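-- pv_equiv track=rewrite | github.com/VinayRuhil/TOC | exactly 2 or 3 1's.py | simulate_fa
-- ===== SOURCE A (Python) =====
-- def simulate_fa(input_string):
--     # States
--     q0, q1, q2, q3, q4 = 0, 1, 2, 3, 4
--     current_state = q0  # Start at the initial state
--
--     # Transition function
--     for char in input_string:
--         if char == '0':
--             # Stay in the same state for input 0
--             pass
--         elif char == '1':
--             if current_state == q0:
--                 current_state = q1
--             elif current_state == q1:
--                 current_state = q2
--             elif current_state == q2:
--                 current_state = q3
--             elif current_state == q3:
--                 current_state = q4
--             elif current_state == q4:
--                 current_state = q4  # Stay in reject state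
--         else:
--             # Invalid input
--             return False
--
--     # Check if we are in an accepting state
--     return current_state == q2 or current_state == q3
-- ===== SOURCE B (Python) =====
-- def simulate_fa(input_string):
--     if not set(input_string) <= {'0', '1'}:
--         return False
--     return input_string.count('1') in (2, 3)
-- ===== Notes on version B (the rewrite author's own statement) =====
-- stated objective: idiomatic
-- what changed: Replaces the per-character five-state if-elif DFA simulation with a library-backed alphabet check (set inclusion) followed by counting the 1's and testing membership in (2, 3).
import Mathlib
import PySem

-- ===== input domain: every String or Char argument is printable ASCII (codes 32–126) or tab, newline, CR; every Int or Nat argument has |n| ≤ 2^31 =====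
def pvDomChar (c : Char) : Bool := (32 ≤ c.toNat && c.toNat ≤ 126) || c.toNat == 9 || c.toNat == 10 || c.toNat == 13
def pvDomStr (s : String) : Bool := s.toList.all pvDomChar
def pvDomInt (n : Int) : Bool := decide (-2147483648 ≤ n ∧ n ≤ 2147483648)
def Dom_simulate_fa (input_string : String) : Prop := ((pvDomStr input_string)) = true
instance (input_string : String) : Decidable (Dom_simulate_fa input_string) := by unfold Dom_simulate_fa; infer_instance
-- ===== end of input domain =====

-- ===== PORT A =====
-- B replaces A's five-state if-elif DFA loop with a set-inclusion alphabet check plus count('1') in (2,3) (idiomatic).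
-- A's loop: for char in input_string, threading current_state; early `return False` on an invalid char
def simulate_fa_loop (chars : List Char) (current_state : Int) : Bool :=
  match chars with
  | [] => current_state == 2 || current_state == 3
  | char :: rest =>
    if char == '0' then
      simulate_fa_loop rest current_state
    else if char == '1' then
      if current_state == 0 then simulate_fa_loop rest 1
      else if current_state == 1 then simulate_fa_loop rest 2
      else if current_state == 2 then simulate_fa_loop rest 3
      else if current_state == 3 then simulate_fa_loop rest 4
      else simulate_fa_loop rest 4
    else
      false

def simulate_fa (input_string : String) : Bool :=
  simulate_fa_loop input_string.toList 0

-- ===== PORT B =====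
-- Source B: if not set(input_string) <= {'0','1'}: return False; return input_string.count('1') in (2, 3)
def simulate_fa_alt (input_string : String) : Bool :=
  if !(PySem.Set.issubset (PySem.Set.ofList input_string.toList) ['0', '1']) then
    false
  else
    decide ((input_string.toList.count '1' : Int) ∈ ([2, 3] : List Int))

-- ===== PRECONDITION & SPEC =====
def Spec_simulate_fa (input_string : String) (out : Bool) : Prop := out = simulate_fa_alt input_string
instance (input_string : String) (out : Bool) : Decidable (Spec_simulate_fa input_string out) := by unfold Spec_simulate_fa; infer_instance

-- ===== CLAIM (what is proved, stated in full; the proofs are below) =====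
def Claim_equal_simulate_fa : Prop := ∀ (input_string : String), Dom_simulate_fa input_string → Spec_simulate_fa input_string (simulate_fa input_string)

-- ===== LEMMAS AND PROOFS =====

-- A's loop started in state min k 4 (k = 1's already consumed) accepts iff all chars are valid
-- and the capped total 1-count lands in {2, 3}.
lemma simulate_fa_loop_char (cs : List Char) (k : Int) (hk : 0 ≤ k) :
    simulate_fa_loop cs (min k 4) =
      (cs.all (fun c => c = '0' ∨ c = '1') &&
        decide (min (k + (cs.count '1' : Int)) 4 = 2 ∨ min (k + (cs.count '1' : Int)) 4 = 3)) := by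
  induction cs generalizing k with
  | nil =>
    simp only [simulate_fa_loop, List.all_nil, List.count_nil, Bool.true_and,
      Int.natCast_zero, add_zero]
    rw [Bool.eq_iff_iff]
    simp only [Bool.or_eq_true, beq_iff_eq, decide_eq_true_eq]
  | cons c rest ih =>
    by_cases h0 : c = '0'
    · subst h0
      simp only [simulate_fa_loop, beq_self_eq_true, if_true, List.all_cons,
        List.count_cons, ih k hk]
      norm_num
    · by_cases h1 : c = '1'
      · subst h1
        have key : simulate_fa_loop ('1' :: rest) (min k 4) =
            simulate_fa_loop rest (min (k + 1) 4) := by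
          have hm : min k 4 = 0 ∨ min k 4 = 1 ∨ min k 4 = 2 ∨ min k 4 = 3 ∨ min k 4 = 4 := by
            omega
          simp only [simulate_fa_loop]
          rcases hm with h | h | h | h | h
          · rw [h, show min (k + 1) 4 = 1 by omega]; simp
          · rw [h, show min (k + 1) 4 = 2 by omega]; simp
          · rw [h, show min (k + 1) 4 = 3 by omega]; simp
          · rw [h, show min (k + 1) 4 = 4 by omega]; simp
          · rw [h, show min (k + 1) 4 = 4 by omega]; simp
        rw [key, ih (k + 1) (by omega)]
        simp only [List.all_cons, List.count_cons, beq_self_eq_true, if_true]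
        push_cast
        rw [show k + 1 + ((rest.count '1' : Int)) = k + ((rest.count '1' : Int) + 1) from by ring]
        norm_num
      · simp only [simulate_fa_loop, List.all_cons]
        rw [if_neg (by simp [h0]), if_neg (by simp [h1])]
        simp [h0, h1]

-- ===== VERDICT (by name: the statement is the Claim_ definition above) =====
theorem simulate_fa_spec : Claim_equal_simulate_fa := by
  intro s _
  unfold Spec_simulate_fa simulate_fa simulate_fa_alt
  have h := simulate_fa_loop_char s.toList 0 le_rfl
  simp only [show min (0 : Int) 4 = 0 from by norm_num, zero_add] at h
  rw [h]
  have hiff : (s.toList.all (fun c => c = '0' ∨ c = '1')) =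
      PySem.Set.issubset (PySem.Set.ofList s.toList) ['0', '1'] := by
    rw [Bool.eq_iff_iff, List.all_eq_true, PySem.Set.issubset_iff _ _]
    constructor
    · intro hall x hx
      rw [PySem.Set.mem_ofList] at hx
      have := hall x hx
      simp_all
    · intro hsub x hx
      have := hsub x ((PySem.Set.mem_ofList _ _).mpr hx)
      simp_all
  by_cases hall : s.toList.all (fun c => c = '0' ∨ c = '1') = true
  · rw [hall, ← hiff, hall]
    simp only [Bool.not_true, Bool.false_eq_true, if_false, Bool.true_and]
    rw [Bool.eq_iff_iff]
    simp only [decide_eq_true_eq, List.mem_cons, List.not_mem_nil, or_false]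
    omega
  · have hf : (s.toList.all (fun c => c = '0' ∨ c = '1')) = false := by
      exact Bool.eq_false_iff.mpr hall
    rw [hf, ← hiff, hf]
    simp
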